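-- pv_equiv track=rewrite | github.com/marvin1099/Pipewire-save-load- | pipewire-script.py | get_sorted_pipewire_types
-- ===== SOURCE A (Python) =====
-- def get_sorted_pipewire_types(pipewire_types):
--     sorted_types = {
--         'Link': [],
--         'Node': [],
--         'Port': []
--     }
--
--     for item in pipewire_types:
--         if item['type'].endswith('Link/3'):
--             sorted_types['Link'].append(item)
--         elif item['type'].endswith('Node/3'):
--             sorted_types['Node'].append(item)
--         elif item['type'].endswith('Port/3'):
--             sorted_types['Port'].append(item)
--
--     return sorted_types['Link'], sorted_types['Node'], sorted_types['Port']
-- ===== SOURCE B (Python) =====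
-- def get_sorted_pipewire_types(pipewire_types):
--     links = [i for i in pipewire_types if i['type'].endswith('Link/3')]
--     nodes = [i for i in pipewire_types if i['type'].endswith('Node/3')]
--     ports = [i for i in pipewire_types if i['type'].endswith('Port/3')]
--     return links, nodes, ports
-- ===== Notes on version B (the rewrite author's own statement) =====
-- stated objective: idiomatic
-- what changed: Replaces the single accumulating if/elif loop over three mutable buckets with three independent filtering comprehensions, one per suffix (exclusive since the three suffixes have equal length and differ).
import Mathlib
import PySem

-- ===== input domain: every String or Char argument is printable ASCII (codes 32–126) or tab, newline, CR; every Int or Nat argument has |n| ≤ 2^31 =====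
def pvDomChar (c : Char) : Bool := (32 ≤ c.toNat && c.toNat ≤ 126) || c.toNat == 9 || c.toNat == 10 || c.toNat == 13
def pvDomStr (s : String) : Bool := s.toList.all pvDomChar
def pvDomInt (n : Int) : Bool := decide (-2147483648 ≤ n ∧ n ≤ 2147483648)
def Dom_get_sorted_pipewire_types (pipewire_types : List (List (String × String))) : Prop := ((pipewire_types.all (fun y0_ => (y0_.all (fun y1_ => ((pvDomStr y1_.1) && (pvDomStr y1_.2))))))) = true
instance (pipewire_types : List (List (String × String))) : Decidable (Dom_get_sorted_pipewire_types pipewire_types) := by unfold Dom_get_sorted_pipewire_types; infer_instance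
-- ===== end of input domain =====

-- B replaces A's single if/elif loop over three mutable buckets with three independent
-- filtering passes (one per suffix); same cost, more idiomatic (objective: idiomatic).

-- ===== PORT A =====
-- item['type'].endswith(suf); the key lookup is Python-exact via PySem.Dict.get?
-- (Pre_ guarantees the key is present, so the "" default is never consulted inside Pre_).
def pvTypeEnds (item : List (String × String)) (suf : String) : Bool :=
  PySem.Str.endswith (((PySem.Dict.mk item).get? "type").getD "") suf

def get_sorted_pipewire_types (pipewire_types : List (List (String × String))) : (List (List (String × String))) × (List (List (String × String))) × (List (List (String × String))) :=
  let st := pipewire_types.foldl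
    (fun (st : List (List (String × String)) × List (List (String × String)) × List (List (String × String))) item =>
      if pvTypeEnds item "Link/3" then (st.1 ++ [item], st.2.1, st.2.2)
      else if pvTypeEnds item "Node/3" then (st.1, st.2.1 ++ [item], st.2.2)
      else if pvTypeEnds item "Port/3" then (st.1, st.2.1, st.2.2 ++ [item])
      else st)
    ([], [], [])
  (st.1, st.2.1, st.2.2)

-- ===== PORT B =====
def get_sorted_pipewire_types_alt (pipewire_types : List (List (String × String))) : (List (List (String × String))) × (List (List (String × String))) × (List (List (String × String))) :=
  (pipewire_types.filter (fun i => pvTypeEnds i "Link/3"),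
   pipewire_types.filter (fun i => pvTypeEnds i "Node/3"),
   pipewire_types.filter (fun i => pvTypeEnds i "Port/3"))

-- ===== PRECONDITION & SPEC =====
-- Pre_ excludes items without a 'type' key, on which A (and B) raise KeyError.
def Pre_get_sorted_pipewire_types (pipewire_types : List (List (String × String))) : Prop :=
  (pipewire_types.all (fun item => ((PySem.Dict.mk item).get? "type").isSome)) = true
instance (pipewire_types : List (List (String × String))) : Decidable (Pre_get_sorted_pipewire_types pipewire_types) := by unfold Pre_get_sorted_pipewire_types; infer_instance

def pvWitness_get_sorted_pipewire_types : (List (List (String × String))) :=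
  [[("type", "PipeWire:Interface:Link/3")], [("type", "PipeWire:Interface:Node/3")], [("type", "Metadata/3")]]

def Spec_get_sorted_pipewire_types (pipewire_types : List (List (String × String))) (out : (List (List (String × String))) × (List (List (String × String))) × (List (List (String × String)))) : Prop := out = get_sorted_pipewire_types_alt pipewire_types
instance (pipewire_types : List (List (String × String))) (out : (List (List (String × String))) × (List (List (String × String))) × (List (List (String × String)))) : Decidable (Spec_get_sorted_pipewire_types pipewire_types out) := by unfold Spec_get_sorted_pipewire_types; infer_instance

-- ===== CLAIM (what is proved, stated in full; the proofs are below) =====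
def Claim_equal_get_sorted_pipewire_types : Prop := ∀ (pipewire_types : List (List (String × String))), Dom_get_sorted_pipewire_types pipewire_types → Pre_get_sorted_pipewire_types pipewire_types → Spec_get_sorted_pipewire_types pipewire_types (get_sorted_pipewire_types pipewire_types)

-- ===== LEMMAS AND PROOFS =====

-- Two distinct suffixes of equal length cannot both be suffixes of the same string.
lemma suffix_excl {s p q : List Char} (hlen : p.length = q.length) (hne : p ≠ q)
    (hp : p <:+ s) : ¬ q <:+ s := by
  intro hq
  obtain ⟨t, ht⟩ := hp
  obtain ⟨u, hu⟩ := hq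
  apply hne
  have h := ht.trans hu.symm
  have : t.length = u.length := by
    have := congrArg List.length h
    simp only [List.length_append] at this
    omega
  exact (List.append_inj h this).2

lemma ends_excl (item : List (String × String)) {p q : String}
    (hlen : p.toList.length = q.toList.length) (hne : p.toList ≠ q.toList)
    (hp : pvTypeEnds item p = true) : pvTypeEnds item q = false := by
  unfold pvTypeEnds at *
  simp only [PySem.Str.endswith_eq] at *
  rw [PySem.Chars.endswith_iff] at hp
  by_contra h
  rw [Bool.not_eq_false, PySem.Chars.endswith_iff] at h
  exact suffix_excl hlen hne hp h

lemma fold_eq_filters (pipewire_types : List (List (String × String)))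
    (l n p : List (List (String × String))) :
    pipewire_types.foldl
      (fun (st : List (List (String × String)) × List (List (String × String)) × List (List (String × String))) item =>
        if pvTypeEnds item "Link/3" then (st.1 ++ [item], st.2.1, st.2.2)
        else if pvTypeEnds item "Node/3" then (st.1, st.2.1 ++ [item], st.2.2)
        else if pvTypeEnds item "Port/3" then (st.1, st.2.1, st.2.2 ++ [item])
        else st)
      (l, n, p)
    = (l ++ pipewire_types.filter (fun i => pvTypeEnds i "Link/3"),
       n ++ pipewire_types.filter (fun i => pvTypeEnds i "Node/3"),
       p ++ pipewire_types.filter (fun i => pvTypeEnds i "Port/3")) := by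
  induction pipewire_types generalizing l n p with
  | nil => simp
  | cons x xs ih =>
    simp only [List.foldl_cons, List.filter_cons]
    by_cases hL : pvTypeEnds x "Link/3" = true
    · have hN := ends_excl x (p := "Link/3") (q := "Node/3") (by decide) (by decide) hL
      have hP := ends_excl x (p := "Link/3") (q := "Port/3") (by decide) (by decide) hL
      simp [hL, hN, hP, ih]
    · by_cases hN : pvTypeEnds x "Node/3" = true
      · have hP := ends_excl x (p := "Node/3") (q := "Port/3") (by decide) (by decide) hN
        simp [hL, hN, hP, ih]
      · by_cases hP : pvTypeEnds x "Port/3" = true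
        · simp [hL, hN, hP, ih]
        · simp [hL, hN, hP, ih]

-- ===== VERDICT (by name: the statement is the Claim_ definition above) =====
theorem get_sorted_pipewire_types_spec : Claim_equal_get_sorted_pipewire_types := by
  intro pipewire_types _ _
  unfold Spec_get_sorted_pipewire_types get_sorted_pipewire_types get_sorted_pipewire_types_alt
  simp [fold_eq_filters]
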